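-- pv_equiv track=rewrite | github.com/dylman123/Multi-Agent-RL | STAGE_1/State_Space.py | make_states
-- ===== SOURCE A (Python) =====
-- def make_states(n, x, y):
--
--     state_space = []
--
--     if n == 1:
--         for a in range(x):
--             for b in range(y):
--                 state_space.append((a, b))
--
--     elif n == 2:
--         for a in range(x):
--             for b in range(y):
--                 for c in range(x):
--                     for d in range(y):
--                         state_space.append((a, b, c, d))
--
--     elif n == 3:
--         for a in range(x):
--             for b in range(y):
--                 for c in range(x):
--                     for d in range(y):
--                         for e in range(x):
--                             for f in range(y):
--                                 state_space.append((a, b, c, d, e, f))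
--
--     elif n == 4:
--         for a in range(x):
--             for b in range(y):
--                 for c in range(x):
--                     for d in range(y):
--                         for e in range(x):
--                             for f in range(y):
--                                 for g in range(x):
--                                     for h in range(y):
--                                         state_space.append((a, b, c, d, e, f, g, h))
--
--     elif n == 5:
--         for a in range(x):
--             for b in range(y):
--                 for c in range(x):
--                     for d in range(y):
--                         for e in range(x):
--                             for f in range(y):
--                                 for g in range(x):
--                                     for h in range(y):
--                                         for i in range(x):
--                                             for j in range(y):
--                                                 state_space.append((a, b, c, d, e, f, g, h, i, j))
--
--     return state_space
-- ===== SOURCE B (Python) =====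
-- def make_states(n, x, y):
--     if n < 1 or n > 5:
--         return []
--     acc = [()]
--     for _ in range(n):
--         for pool in (range(x), range(y)):
--             acc = [t + (v,) for t in acc for v in pool]
--     return acc
-- ===== Notes on version B (the rewrite author's own statement) =====
-- stated objective: simpler
-- what changed: Replaced the five hand-unrolled nested-loop branches (2n-deep loops per agent count) with one range guard plus a single generic product fold that extends partial tuples pool by pool, preserving the exact lexicographic order.
import Mathlib
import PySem

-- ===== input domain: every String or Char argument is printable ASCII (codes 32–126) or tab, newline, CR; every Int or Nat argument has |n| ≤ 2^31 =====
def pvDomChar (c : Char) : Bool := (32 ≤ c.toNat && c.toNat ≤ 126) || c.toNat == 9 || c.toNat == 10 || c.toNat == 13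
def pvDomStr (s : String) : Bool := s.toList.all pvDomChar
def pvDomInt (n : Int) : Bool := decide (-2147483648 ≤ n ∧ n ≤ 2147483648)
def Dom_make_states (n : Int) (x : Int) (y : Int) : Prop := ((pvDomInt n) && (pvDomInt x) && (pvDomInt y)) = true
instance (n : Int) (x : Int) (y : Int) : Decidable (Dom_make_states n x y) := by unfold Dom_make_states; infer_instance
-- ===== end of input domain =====

-- B replaces A's five hand-unrolled nested-loop branches by one range guard plus a single
-- generic product fold that extends partial tuples pool by pool (objective: simpler).

-- ===== PORT A =====
-- literal transliteration of A: five unrolled branches of nested 'for … in range(…)' loops,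
-- each appending one tuple (here: List Int) to the accumulator.
def make_states (n : Int) (x : Int) (y : Int) : List (List Int) :=
  let state_space : List (List Int) := []
  if n == 1 then
    (PySem.List.pyRange 0 x 1).foldl (fun s a =>
      (PySem.List.pyRange 0 y 1).foldl (fun s b => s ++ [[a, b]]) s) state_space
  else if n == 2 then
    (PySem.List.pyRange 0 x 1).foldl (fun s a =>
      (PySem.List.pyRange 0 y 1).foldl (fun s b =>
        (PySem.List.pyRange 0 x 1).foldl (fun s c =>
          (PySem.List.pyRange 0 y 1).foldl (fun s d => s ++ [[a, b, c, d]]) s) s) s) state_space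
  else if n == 3 then
    (PySem.List.pyRange 0 x 1).foldl (fun s a =>
      (PySem.List.pyRange 0 y 1).foldl (fun s b =>
        (PySem.List.pyRange 0 x 1).foldl (fun s c =>
          (PySem.List.pyRange 0 y 1).foldl (fun s d =>
            (PySem.List.pyRange 0 x 1).foldl (fun s e =>
              (PySem.List.pyRange 0 y 1).foldl (fun s f =>
                s ++ [[a, b, c, d, e, f]]) s) s) s) s) s) state_space
  else if n == 4 then
    (PySem.List.pyRange 0 x 1).foldl (fun s a =>
      (PySem.List.pyRange 0 y 1).foldl (fun s b =>
        (PySem.List.pyRange 0 x 1).foldl (fun s c =>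
          (PySem.List.pyRange 0 y 1).foldl (fun s d =>
            (PySem.List.pyRange 0 x 1).foldl (fun s e =>
              (PySem.List.pyRange 0 y 1).foldl (fun s f =>
                (PySem.List.pyRange 0 x 1).foldl (fun s g =>
                  (PySem.List.pyRange 0 y 1).foldl (fun s h =>
                    s ++ [[a, b, c, d, e, f, g, h]]) s) s) s) s) s) s) s) state_space
  else if n == 5 then
    (PySem.List.pyRange 0 x 1).foldl (fun s a =>
      (PySem.List.pyRange 0 y 1).foldl (fun s b =>
        (PySem.List.pyRange 0 x 1).foldl (fun s c =>
          (PySem.List.pyRange 0 y 1).foldl (fun s d =>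
            (PySem.List.pyRange 0 x 1).foldl (fun s e =>
              (PySem.List.pyRange 0 y 1).foldl (fun s f =>
                (PySem.List.pyRange 0 x 1).foldl (fun s g =>
                  (PySem.List.pyRange 0 y 1).foldl (fun s h =>
                    (PySem.List.pyRange 0 x 1).foldl (fun s i =>
                      (PySem.List.pyRange 0 y 1).foldl (fun s j =>
                        s ++ [[a, b, c, d, e, f, g, h, i, j]]) s) s) s) s) s) s) s) s) s) state_space
  else state_space

-- ===== PORT B =====
-- 'acc = [t + (v,) for t in acc for v in pool]' : extend every partial tuple by every pool value
def stepB (acc : List (List Int)) (pool : List Int) : List (List Int) :=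
  acc.flatMap (fun t => pool.map (fun v => t ++ [v]))

def make_states_alt (n : Int) (x : Int) (y : Int) : List (List Int) :=
  if n < 1 ∨ 5 < n then []
  else
    (List.range n.toNat).foldl
      (fun acc _ => stepB (stepB acc (PySem.List.pyRange 0 x 1)) (PySem.List.pyRange 0 y 1))
      [[]]

-- ===== PRECONDITION & SPEC =====
def Spec_make_states (n : Int) (x : Int) (y : Int) (out : List (List Int)) : Prop := out = make_states_alt n x y
instance (n : Int) (x : Int) (y : Int) (out : List (List Int)) : Decidable (Spec_make_states n x y out) := by unfold Spec_make_states; infer_instance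

-- ===== CLAIM (what is proved, stated in full; the proofs are below) =====
def Claim_equal_make_states : Prop := ∀ (n : Int) (x : Int) (y : Int), Dom_make_states n x y → Spec_make_states n x y (make_states n x y)

-- ===== LEMMAS AND PROOFS =====
theorem flatten_map_singleton {A B : Type} (l : List A) (g : A → B) :
    (l.map (fun b => [g b])).flatten = l.map g := by
  induction l with
  | nil => simp
  | cons h t ih => simp [ih]

theorem flatten_flatten_map {A B : Type} (l : List A) (f : A → List (List B)) :
    (l.map f).flatten.flatten = (l.map (fun a => (f a).flatten)).flatten := by
  induction l with
  | nil => simp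
  | cons h t ih => simp [ih]

theorem make_states_spec_aux (n x y : Int) : make_states n x y = make_states_alt n x y := by
  by_cases h1 : n = 1
  · subst h1
    simp only [make_states, make_states_alt]
    norm_num
    simp [stepB, PySem.List.foldl_append_singleton_eq_map, PySem.List.foldl_append_eq_flatMap,
      List.flatMap_assoc, List.flatMap_map, List.map_flatMap, Function.comp_def,
      List.flatMap_def, flatten_map_singleton, flatten_flatten_map, List.range_succ]
  · by_cases h2 : n = 2
    · subst h2
      simp only [make_states, make_states_alt]
      norm_num
      simp [stepB, PySem.List.foldl_append_singleton_eq_map, PySem.List.foldl_append_eq_flatMap,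
        List.flatMap_assoc, List.flatMap_map, List.map_flatMap, Function.comp_def,
        List.flatMap_def, flatten_map_singleton, flatten_flatten_map, List.range_succ]
    · by_cases h3 : n = 3
      · subst h3
        simp only [make_states, make_states_alt]
        norm_num
        simp [stepB, PySem.List.foldl_append_singleton_eq_map, PySem.List.foldl_append_eq_flatMap,
          List.flatMap_assoc, List.flatMap_map, List.map_flatMap, Function.comp_def,
          List.flatMap_def, flatten_map_singleton, flatten_flatten_map, List.range_succ]
      · by_cases h4 : n = 4
        · subst h4
          simp only [make_states, make_states_alt]
          norm_num
          simp [stepB, PySem.List.foldl_append_singleton_eq_map, PySem.List.foldl_append_eq_flatMap,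
            List.flatMap_assoc, List.flatMap_map, List.map_flatMap, Function.comp_def,
            List.flatMap_def, flatten_map_singleton, flatten_flatten_map, List.range_succ]
        · by_cases h5 : n = 5
          · subst h5
            simp only [make_states, make_states_alt]
            norm_num
            simp [stepB, PySem.List.foldl_append_singleton_eq_map, PySem.List.foldl_append_eq_flatMap,
              List.flatMap_assoc, List.flatMap_map, List.map_flatMap, Function.comp_def,
              List.flatMap_def, flatten_map_singleton, flatten_flatten_map, List.range_succ]
          · -- all other n: A falls through every branch, B's guard fires
            have hguard : n < 1 ∨ 5 < n := by omega
            simp only [make_states, make_states_alt]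
            rw [if_neg (by simpa using h1), if_neg (by simpa using h2), if_neg (by simpa using h3),
              if_neg (by simpa using h4), if_neg (by simpa using h5), if_pos hguard]

-- ===== VERDICT (by name: the statement is the Claim_ definition above) =====
theorem make_states_spec : Claim_equal_make_states := by
  intro n x y _
  unfold Spec_make_states
  exact make_states_spec_aux n x y
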